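-- pv_equiv track=rewrite | github.com/Daseull/Algorithm | 백준/Gold/1941. 소문난 칠공주 py/소문난칠공주.py | bfs
-- ===== SOURCE A (Python) =====
-- from collections import deque
--
-- def bfs(positions):
--     q = deque()
--     q.append(positions[-1])
--     positions.pop()
--
--     while q:
--         x, y = q.popleft()
--         for dx, dy in [(-1, 0), (1, 0), (0, -1), (0, 1)]:
--             nx, ny = x + dx, y + dy
--             if (nx, ny) in positions:
--                 q.append((nx, ny))
--                 positions.remove((nx, ny))
--
--     return not positions
-- ===== SOURCE B (Python) =====
-- def bfs(positions):
--     remaining = set(positions)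
--     seed = positions[-1]
--     remaining.remove(seed)
--
--     def visit(p):
--         x, y = p
--         for n in ((x - 1, y), (x + 1, y), (x, y - 1), (x, y + 1)):
--             if n in remaining:
--                 remaining.remove(n)
--                 visit(n)
--
--     visit(seed)
--     return not remaining
-- ===== Notes on version B (the rewrite author's own statement) =====
-- stated objective: alternative
-- what changed: Replaces the BFS queue with in-place list membership/removal by a recursive depth-first flood fill over a hash set built once, returning whether every cell was swept (B does not mutate the input list).
-- outside the precondition, e.g. on bfs([(0, 0), (0, 0)]): A returns False, B returns True; on bfs([(0, 0), (1, 0), (0, 0), (0, 0)]): A returns False, B returns True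
import Mathlib
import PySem

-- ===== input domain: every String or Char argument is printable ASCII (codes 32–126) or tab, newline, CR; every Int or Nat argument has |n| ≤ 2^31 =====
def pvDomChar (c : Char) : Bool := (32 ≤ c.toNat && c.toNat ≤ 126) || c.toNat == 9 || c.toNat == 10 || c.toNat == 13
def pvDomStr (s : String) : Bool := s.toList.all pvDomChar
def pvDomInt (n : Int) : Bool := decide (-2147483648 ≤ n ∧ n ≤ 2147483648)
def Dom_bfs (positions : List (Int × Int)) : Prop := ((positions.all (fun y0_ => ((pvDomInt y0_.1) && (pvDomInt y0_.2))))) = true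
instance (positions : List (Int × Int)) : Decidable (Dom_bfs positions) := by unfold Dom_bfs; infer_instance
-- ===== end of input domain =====

-- B re-implements the connectivity test as a recursive flood fill over a hash set instead of a
-- BFS queue with list removal; equivalence is about the RETURN value only (A empties the caller's
-- `positions` list in place, B does not mutate it).


-- ===== PORT A =====
-- the literal direction list [(-1, 0), (1, 0), (0, -1), (0, 1)]
def pvDirs : List (Int × Int) := [(-1, 0), (1, 0), (0, -1), (0, 1)]

-- body of A's `for dx, dy in …` loop: state = (queue, positions);
-- `positions.remove((nx,ny))` under the `in` guard is erase of the first occurrence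
-- (PySem.List.remove?_eq_some_erase)
def pvStepA (x y : Int) (st : List (Int × Int) × List (Int × Int)) (d : Int × Int) :
    List (Int × Int) × List (Int × Int) :=
  let n := (x + d.1, y + d.2)
  if n ∈ st.2 then (st.1 ++ [n], st.2.erase n) else st

-- measure lemma used only for termination of the while loop below
theorem pvStepA_measure (x y : Int) (ds : List (Int × Int)) :
    ∀ st : List (Int × Int) × List (Int × Int),
      (ds.foldl (pvStepA x y) st).1.length + 2 * (ds.foldl (pvStepA x y) st).2.length ≤
        st.1.length + 2 * st.2.length := by
  induction ds with
  | nil => intro st; simp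
  | cons d ds ih =>
      intro st
      simp only [List.foldl_cons]
      refine (ih _).trans ?_
      by_cases h : (x + d.1, y + d.2) ∈ st.2
      · have hpos : 0 < st.2.length := List.length_pos_of_mem h
        simp [pvStepA, h, List.length_erase_of_mem h]
        omega
      · simp [pvStepA, h]

-- A's `while q:` loop
def bfsLoop : List (Int × Int) → List (Int × Int) → Bool
  | [], positions => positions.isEmpty          -- return not positions
  | (x, y) :: q, positions =>
      let st := pvDirs.foldl (pvStepA x y) (q, positions)
      bfsLoop st.1 st.2
termination_by q positions => q.length + 2 * positions.length
decreasing_by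
  exact lt_of_le_of_lt (pvStepA_measure x y pvDirs (q, positions))
    (Nat.add_lt_add_right (Nat.lt_succ_self q.length) (2 * positions.length))

def bfs (positions : List (Int × Int)) : Bool :=
  match PySem.List.pyGet? positions (-1) with
  | none => false                                -- positions[-1] raises IndexError (outside Pre_)
  | some seed => bfsLoop [seed] positions.dropLast   -- q = [positions[-1]]; positions.pop()

-- ===== PORT B =====
-- the tuple of four neighbours visit() iterates over
def pvNbrs (p : Int × Int) : List (Int × Int) :=
  [(p.1 - 1, p.2), (p.1 + 1, p.2), (p.1, p.2 - 1), (p.1, p.2 + 1)]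

-- `visit` of Source B, sequenced over a pending-neighbour list; the subtype bound is only a
-- termination certificate (result ⊆ remaining), the computation is Source B's recursion.
-- `remaining.remove(n)` under the `in` guard is erase (PySem.Set.remove?_of_mem).
theorem pvEraseLt {r : List (Int × Int)} {n : Int × Int} (h : n ∈ r) :
    (r.erase n).length < r.length := by
  rw [List.length_erase_of_mem h]
  exact Nat.sub_lt (List.length_pos_of_mem h) Nat.one_pos

def pvVisit : (ns : List (Int × Int)) → (r : List (Int × Int)) →
    {s : List (Int × Int) // s.length ≤ r.length}
  | [], r => ⟨r, le_rfl⟩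
  | n :: ns, r =>
      if h : n ∈ r then
        let s1 := pvVisit (pvNbrs n) (r.erase n)
        let s2 := pvVisit ns s1.val
        ⟨s2.val, s2.property.trans (s1.property.trans List.length_erase_le)⟩
      else pvVisit ns r
termination_by ns r => (r.length, ns.length)
decreasing_by
  all_goals first
    | exact Prod.Lex.right _ (Nat.lt_succ_self ns.length)
    | (apply Prod.Lex.left; exact pvEraseLt h)
    | (apply Prod.Lex.left; exact lt_of_le_of_lt s1.property (pvEraseLt h))

def bfs_alt (positions : List (Int × Int)) : Bool :=
  let remaining := PySem.Set.ofList positions          -- set(positions)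
  match PySem.List.pyGet? positions (-1) with
  | none => false                                      -- positions[-1] raises IndexError (outside Pre_)
  | some seed =>
      (pvVisit (pvNbrs seed) (remaining.erase seed)).val.isEmpty   -- remove(seed); visit(seed); not remaining

-- ===== PRECONDITION & SPEC =====
-- Pre_ excludes the empty list, on which both programs raise IndexError at positions[-1], and
-- lists with duplicate positions, on which A's per-copy list.remove semantics is an accident of
-- storing a set of cells in a list while B's set collapses the duplicates.
def Pre_bfs (positions : List (Int × Int)) : Prop := positions ≠ [] ∧ positions.Nodup
instance (positions : List (Int × Int)) : Decidable (Pre_bfs positions) := by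
  unfold Pre_bfs; infer_instance

def pvWitness_bfs : (List (Int × Int)) := [(0, 0), (0, 1)]

def Spec_bfs (positions : List (Int × Int)) (out : Bool) : Prop := out = bfs_alt positions
instance (positions : List (Int × Int)) (out : Bool) : Decidable (Spec_bfs positions out) := by
  unfold Spec_bfs; infer_instance

-- ===== CLAIM (what is proved, stated in full; the proofs are below) =====
def Claim_equal_bfs : Prop := ∀ (positions : List (Int × Int)), Dom_bfs positions → Pre_bfs positions → Spec_bfs positions (bfs positions)

-- ===== LEMMAS AND PROOFS =====

-- p is reachable from w by a nonempty chain of grid-adjacent steps whose nodes all lie in R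
inductive pvRch (R : List (Int × Int)) (w : Int × Int) : (Int × Int) → Prop where
  | base {p : Int × Int} : p ∈ pvNbrs w → p ∈ R → pvRch R w p
  | step {q p : Int × Int} : pvRch R w q → p ∈ pvNbrs q → p ∈ R → pvRch R w p

theorem pvRch_mem {R : List (Int × Int)} {w p : Int × Int} (h : pvRch R w p) : p ∈ R := by
  cases h <;> assumption

theorem pvRch_mono {S R : List (Int × Int)} (hsub : ∀ a, a ∈ S → a ∈ R)
    {w p : Int × Int} (h : pvRch S w p) : pvRch R w p := by
  induction h with
  | base hn hm => exact pvRch.base hn (hsub _ hm)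
  | step _ hn hm ih => exact pvRch.step ih hn (hsub _ hm)

theorem pvRch_congr {S R : List (Int × Int)} (hmem : ∀ a, a ∈ S ↔ a ∈ R)
    (w p : Int × Int) : pvRch S w p ↔ pvRch R w p :=
  ⟨pvRch_mono fun a => (hmem a).1, pvRch_mono fun a => (hmem a).2⟩

theorem pvRch_trans {R : List (Int × Int)} {a b c : Int × Int}
    (h1 : pvRch R a b) (h2 : pvRch R b c) : pvRch R a c := by
  induction h2 with
  | base hn hm => exact pvRch.step h1 hn hm
  | step _ hn hm ih => exact pvRch.step ih hn hm

-- first-step decomposition of reachability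
theorem pvRch_first {R : List (Int × Int)} {x p : Int × Int} :
    pvRch R x p ↔ ∃ n ∈ pvNbrs x, n ∈ R ∧ (p = n ∨ pvRch R n p) := by
  constructor
  · intro h
    induction h with
    | base hn hm => exact ⟨_, hn, hm, Or.inl rfl⟩
    | step _ hn hm ih =>
        obtain ⟨m, hm1, hm2, hc⟩ := ih
        refine ⟨m, hm1, hm2, Or.inr ?_⟩
        rcases hc with rfl | hr
        · exact pvRch.base hn hm
        · exact pvRch.step hr hn hm
  · rintro ⟨n, hn1, hn2, rfl | hr⟩
    · exact pvRch.base hn1 hn2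
    · exact pvRch_trans (pvRch.base hn1 hn2) hr

-- "last exit" lemma: a path to p ∉ N either avoids N entirely, or its tail from the last
-- N-node already runs inside R' = R \ N
theorem pvLastExit {R : List (Int × Int)} {w p : Int × Int} (N : (Int × Int) → Prop)
    (R' : List (Int × Int)) (hR' : ∀ a, a ∈ R' ↔ a ∈ R ∧ ¬ N a)
    (h : pvRch R w p) (hp : ¬ N p) :
    pvRch R' w p ∨ ∃ n, N n ∧ n ∈ R ∧ pvRch R' n p := by
  induction h with
  | base hn hm => exact Or.inl (pvRch.base hn ((hR' _).2 ⟨hm, hp⟩))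
  | @step q _ hq hn hm ih =>
      have hpR' : _ ∈ R' := (hR' _).2 ⟨hm, hp⟩
      by_cases hNq : N q
      · exact Or.inr ⟨q, hNq, pvRch_mem hq, pvRch.base hn hpR'⟩
      · rcases ih hNq with h1 | ⟨k, hk1, hk2, hk3⟩
        · exact Or.inl (pvRch.step h1 hn hpR')
        · exact Or.inr ⟨k, hk1, hk2, pvRch.step hk3 hn hpR'⟩

-- self-avoiding paths: a nonempty path from n to p ≠ n can avoid n itself
theorem pvRch_erase {R : List (Int × Int)} (hR : R.Nodup) {n p : Int × Int}
    (hp : p ≠ n) (h : pvRch R n p) : pvRch (R.erase n) n p := by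
  have hmem : ∀ a, a ∈ R.erase n ↔ a ∈ R ∧ ¬ (a = n) := by
    intro a
    rw [List.Nodup.mem_erase_iff hR]
    tauto
  rcases pvLastExit (fun a => a = n) (R.erase n) hmem h hp with h1 | ⟨k, rfl, _, hk3⟩
  · exact h1
  · exact hk3

-- for p ≠ n the erase is invisible to reachability from n
theorem pvRch_erase_iff {R : List (Int × Int)} (hR : R.Nodup) {n p : Int × Int} (hp : p ≠ n) :
    pvRch (R.erase n) n p ↔ pvRch R n p :=
  ⟨pvRch_mono fun _ ha => List.mem_of_mem_erase ha, pvRch_erase hR hp⟩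

-- "everything in R is reachable from the worklist q"
def pvGoal (q R : List (Int × Int)) : Prop := ∀ p ∈ R, ∃ w ∈ q, pvRch R w p

-- proof-side form of A's inner fold step, on the neighbour point itself
def pvStepP (st : List (Int × Int) × List (Int × Int)) (n : Int × Int) :
    List (Int × Int) × List (Int × Int) :=
  if n ∈ st.2 then (st.1 ++ [n], st.2.erase n) else st

theorem pvNbrs_eq_map (x y : Int) :
    pvNbrs (x, y) = pvDirs.map (fun d => (x + d.1, y + d.2)) := by
  simp [pvNbrs, pvDirs]
  constructor <;> ring_nf

theorem pvNbrs_nodup (p : Int × Int) : (pvNbrs p).Nodup := by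
  obtain ⟨x, y⟩ := p
  simp [pvNbrs, Prod.ext_iff]
  omega

theorem pvFoldA_eq (x y : Int) (st : List (Int × Int) × List (Int × Int)) :
    pvDirs.foldl (pvStepA x y) st = (pvNbrs (x, y)).foldl pvStepP st := by
  rw [pvNbrs_eq_map, List.foldl_map]
  rfl

-- a fold of pvStepP over distinct candidate points appends the present ones to the queue
-- and filters them out of R
theorem pvFold_char (ps : List (Int × Int)) : ∀ (q R : List (Int × Int)),
    ps.Nodup → R.Nodup →
    ps.foldl pvStepP (q, R) =
      (q ++ ps.filter (· ∈ R), R.filter (fun a => decide (a ∉ ps))) := by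
  induction ps with
  | nil => intro q R _ _; simp
  | cons n ps ih =>
      intro q R hps hR
      have hn : n ∉ ps := (List.nodup_cons.mp hps).1
      have hps' : ps.Nodup := (List.nodup_cons.mp hps).2
      by_cases h : n ∈ R
      · have hRe : (R.erase n).Nodup := hR.erase n
        simp only [List.foldl_cons, pvStepP, h, if_pos]
        rw [ih (q ++ [n]) (R.erase n) hps' hRe]
        simp only [Prod.mk.injEq]
        constructor
        · rw [List.filter_cons_of_pos (by simpa using h), List.append_assoc]
          congr 1
          simp only [List.singleton_append, List.cons.injEq, true_and]
          apply List.filter_congr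
          intro a ha
          have hane : a ≠ n := fun hh => hn (hh ▸ ha)
          simp [List.Nodup.mem_erase_iff hR, hane]
        · rw [hR.erase_eq_filter n, List.filter_filter]
          apply List.filter_congr
          intro a _
          by_cases han : a = n <;> simp [han]
      · simp only [List.foldl_cons, pvStepP, h, if_neg, not_false_iff]
        rw [ih q R hps' hR]
        simp only [Prod.mk.injEq]
        constructor
        · rw [List.filter_cons_of_neg (by simpa using h)]
        · apply List.filter_congr
          intro a ha
          have hane : a ≠ n := fun hh => h (hh ▸ ha)
          simp [hane]

theorem pvGoal_step (x : Int × Int) (q' R : List (Int × Int)) :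
    pvGoal (x :: q') R ↔
      pvGoal (q' ++ (pvNbrs x).filter (· ∈ R)) (R.filter (fun a => decide (a ∉ pvNbrs x))) := by
  have hmem : ∀ a : Int × Int,
      a ∈ R.filter (fun a => decide (a ∉ pvNbrs x)) ↔ a ∈ R ∧ ¬ a ∈ pvNbrs x := by
    intro a; simp
  constructor
  · intro H p hp
    obtain ⟨hpR, hpN⟩ := (hmem p).1 hp
    obtain ⟨w, hw, hr⟩ := H p hpR
    rcases pvLastExit (fun a => a ∈ pvNbrs x) _ hmem hr hpN with h1 | ⟨k, hk1, hk2, hk3⟩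
    · rcases List.mem_cons.mp hw with rfl | hwq
      · -- a path from x inside R \ nbrs(x) is impossible: its first node is a neighbour of x
        obtain ⟨n, hn1, hn2, -⟩ := pvRch_first.mp h1
        exact absurd hn1 ((hmem n).1 hn2).2
      · exact ⟨w, List.mem_append_left _ hwq, h1⟩
    · exact ⟨k, List.mem_append_right _ (by simp [hk1, hk2]), hk3⟩
  · intro H p hpR
    by_cases hpN : p ∈ pvNbrs x
    · exact ⟨x, List.mem_cons_self, pvRch.base hpN hpR⟩
    · obtain ⟨w, hw, hr⟩ := H p ((hmem p).2 ⟨hpR, hpN⟩)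
      have hrR : pvRch R w p := pvRch_mono (fun a ha => ((hmem a).1 ha).1) hr
      rcases List.mem_append.mp hw with hwq | hwN
      · exact ⟨w, List.mem_cons_of_mem _ hwq, hrR⟩
      · have hw' : w ∈ pvNbrs x ∧ w ∈ R := by simpa using hwN
        exact ⟨x, List.mem_cons_self, pvRch_trans (pvRch.base hw'.1 hw'.2) hrR⟩

theorem bfsLoop_char : ∀ (q R : List (Int × Int)), R.Nodup →
    (bfsLoop q R = true ↔ pvGoal q R) := by
  intro q R
  induction q, R using bfsLoop.induct with
  | case1 R =>
      intro hR
      simp [bfsLoop, pvGoal, List.isEmpty_iff, List.eq_nil_iff_forall_not_mem]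
  | case2 x y q R st ih =>
      intro hR
      have hch : pvDirs.foldl (pvStepA x y) (q, R) =
          (q ++ (pvNbrs (x, y)).filter (· ∈ R),
           R.filter (fun a => decide (a ∉ pvNbrs (x, y)))) := by
        rw [pvFoldA_eq]
        exact pvFold_char _ q R (pvNbrs_nodup _) hR
      rw [bfsLoop, hch]
      have hnd : (R.filter (fun a => decide (a ∉ pvNbrs (x, y)))).Nodup := hR.filter _
      have ih2 : (pvDirs.foldl (pvStepA x y) (q, R)).2.Nodup →
          (bfsLoop (pvDirs.foldl (pvStepA x y) (q, R)).1
              (pvDirs.foldl (pvStepA x y) (q, R)).2 = true ↔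
            pvGoal (pvDirs.foldl (pvStepA x y) (q, R)).1
              (pvDirs.foldl (pvStepA x y) (q, R)).2) := ih
      rw [hch] at ih2
      exact (ih2 hnd).trans (pvGoal_step (x, y) q R).symm

-- "p gets swept while the pending-neighbour list ns is processed against R"
def pvRem (ns R : List (Int × Int)) (p : Int × Int) : Prop :=
  ∃ n ∈ ns, n ∈ R ∧ (p = n ∨ pvRch R n p)

theorem pvRem_cons {m : Int × Int} {ms R : List (Int × Int)} {p : Int × Int} :
    pvRem (m :: ms) R p ↔ (m ∈ R ∧ (p = m ∨ pvRch R m p)) ∨ pvRem ms R p := by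
  simp [pvRem, List.mem_cons, exists_eq_or_imp]

theorem pvVisit_charAux (k : Nat) : ∀ R : List (Int × Int), R.length ≤ k → R.Nodup →
    ∀ ns : List (Int × Int),
    (∀ p, p ∈ (pvVisit ns R).val ↔ p ∈ R ∧ ¬ pvRem ns R p) ∧ (pvVisit ns R).val.Nodup := by
  induction k using Nat.strong_induction_on with
  | _ k IHk =>
  intro r hlen hR ns
  induction ns with
  | nil =>
      constructor
      · intro p; simp [pvVisit, pvRem]
      · simpa [pvVisit] using hR
  | cons n ns IHns =>
      by_cases h : n ∈ r
      case neg =>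
        obtain ⟨mem, nd⟩ := IHns
        have hv : (pvVisit (n :: ns) r).val = (pvVisit ns r).val := by
          rw [pvVisit]; simp [h]
        refine ⟨?_, by rw [hv]; exact nd⟩
        intro p
        rw [hv, mem p, pvRem_cons]
        have : ¬ (n ∈ r ∧ (p = n ∨ pvRch r n p)) := fun hh => h hh.1
        tauto
      case pos =>
      have hps : 0 < r.length := List.length_pos_of_mem h
      have h3 : (r.erase n).length < r.length := by
        rw [List.length_erase_of_mem h]; omega
      obtain ⟨mem1, nd1⟩ :=
        IHk (r.erase n).length (by omega) (r.erase n) le_rfl (hR.erase n) (pvNbrs n)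
      -- membership in the flood result from n, phrased over the full r
      have hs1 : ∀ p, p ∈ (pvVisit (pvNbrs n) (r.erase n)).val ↔
          p ∈ r ∧ ¬ (p = n ∨ pvRch r n p) := by
        intro p
        rw [mem1 p, List.Nodup.mem_erase_iff hR]
        have hrem : pvRem (pvNbrs n) (r.erase n) p ↔ pvRch (r.erase n) n p :=
          (pvRch_first (R := r.erase n)).symm
        rw [hrem]
        constructor
        · rintro ⟨⟨hpn, hpr⟩, hnr⟩
          refine ⟨hpr, ?_⟩
          rintro (rfl | hc)
          · exact hpn rfl
          · exact hnr ((pvRch_erase_iff hR hpn).2 hc)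
        · rintro ⟨hpr, hnc⟩
          have hpn : p ≠ n := fun hh => hnc (Or.inl hh)
          exact ⟨⟨hpn, hpr⟩, fun hc => hnc (Or.inr ((pvRch_erase_iff hR hpn).1 hc))⟩
      have hlen1 : (pvVisit (pvNbrs n) (r.erase n)).val.length < k := by
        have := (pvVisit (pvNbrs n) (r.erase n)).property
        omega
      obtain ⟨mem2, nd2⟩ :=
        IHk (pvVisit (pvNbrs n) (r.erase n)).val.length hlen1
          (pvVisit (pvNbrs n) (r.erase n)).val le_rfl nd1 ns
      have hsub : ∀ a, a ∈ (pvVisit (pvNbrs n) (r.erase n)).val → a ∈ r :=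
        fun a ha => ((hs1 a).1 ha).1
      -- pending neighbours sweep the same cells against the flooded set as against r
      have hex : ∀ p, p ∈ (pvVisit (pvNbrs n) (r.erase n)).val →
          (pvRem ns (pvVisit (pvNbrs n) (r.erase n)).val p ↔ pvRem ns r p) := by
        intro p hps
        have hNp : ¬ (p = n ∨ pvRch r n p) := ((hs1 p).1 hps).2
        constructor
        · rintro ⟨m, hm, hms, hc⟩
          exact ⟨m, hm, hsub m hms, hc.imp id (pvRch_mono hsub)⟩
        · rintro ⟨m, hm, hmr, hc⟩
          rcases hc with rfl | hrch
          · exact ⟨p, hm, hps, Or.inl rfl⟩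
          · by_cases hms : m ∈ (pvVisit (pvNbrs n) (r.erase n)).val
            · rcases pvLastExit (fun a => a = n ∨ pvRch r n a) _ hs1 hrch hNp with
                h1 | ⟨k, hk1, hk2, hk3⟩
              · exact ⟨m, hm, hms, Or.inr h1⟩
              · exfalso
                have hkp : pvRch r k p := pvRch_mono hsub hk3
                rcases hk1 with rfl | hnk
                · exact hNp (Or.inr hkp)
                · exact hNp (Or.inr (pvRch_trans hnk hkp))
            · exfalso
              have : ¬ (m ∈ r ∧ ¬ (m = n ∨ pvRch r n m)) := fun hh => hms ((hs1 m).2 hh)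
              rcases not_and_or.mp this with hh | hh
              · exact hh hmr
              · rcases not_not.mp hh with rfl | hnm
                · exact hNp (Or.inr hrch)
                · exact hNp (Or.inr (pvRch_trans hnm hrch))
      have hgoal : ∀ p, p ∈ (pvVisit (n :: ns) r).val ↔ p ∈ r ∧ ¬ pvRem (n :: ns) r p := by
        intro p
        have hv : (pvVisit (n :: ns) r).val =
            (pvVisit ns (pvVisit (pvNbrs n) (r.erase n)).val).val := by
          rw [pvVisit]; simp [h]
        rw [hv, mem2 p, pvRem_cons]
        constructor
        · rintro ⟨hps1, hrem⟩
          have h1 := (hs1 p).1 hps1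
          refine ⟨h1.1, ?_⟩
          rintro (⟨-, hc⟩ | hrm)
          · exact h1.2 hc
          · exact hrem ((hex p hps1).2 hrm)
        · rintro ⟨hpr, hnrem⟩
          have hNc : ¬ (p = n ∨ pvRch r n p) := fun hc => hnrem (Or.inl ⟨h, hc⟩)
          have hps1 : p ∈ (pvVisit (pvNbrs n) (r.erase n)).val := (hs1 p).2 ⟨hpr, hNc⟩
          exact ⟨hps1, fun hrm => hnrem (Or.inr ((hex p hps1).1 hrm))⟩
      refine ⟨hgoal, ?_⟩
      have hv : (pvVisit (n :: ns) r).val =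
          (pvVisit ns (pvVisit (pvNbrs n) (r.erase n)).val).val := by
        rw [pvVisit]; simp [h]
      rw [hv]; exact nd2

theorem pvVisit_char (ns R : List (Int × Int)) (hR : R.Nodup) :
    (∀ p, p ∈ (pvVisit ns R).val ↔ p ∈ R ∧ ¬ pvRem ns R p) ∧ (pvVisit ns R).val.Nodup :=
  pvVisit_charAux R.length R le_rfl hR ns

-- ===== VERDICT (by name: the statement is the Claim_ definition above) =====
theorem bfs_spec : Claim_equal_bfs := by
  intro positions _ hpre
  unfold Spec_bfs
  obtain ⟨hne, hnd⟩ := hpre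
  obtain ⟨l, a, rfl⟩ : ∃ l a, positions = l ++ [a] := by
    rcases List.eq_nil_or_concat positions with h | ⟨l, a, h⟩
    · exact absurd h hne
    · exact ⟨l, a, by simpa using h⟩
  have hl : l.Nodup := (List.nodup_append.mp hnd).1
  have hal : a ∉ l := by
    have hd := (List.nodup_append.mp hnd).2.2
    exact fun hmem => hd a hmem a (List.mem_singleton_self a) rfl
  have hget : PySem.List.pyGet? (l ++ [a]) (-1) = some a :=
    PySem.List.pyGet?_neg_one_append_singleton l a
  -- the common characterisation: every removed cell is reachable from the seed
  have hA : bfs (l ++ [a]) = true ↔ ∀ p ∈ l, pvRch l a p := by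
    have : bfs (l ++ [a]) = bfsLoop [a] l := by
      simp [bfs, hget]
    rw [this, bfsLoop_char [a] l hl]
    simp [pvGoal]
  have hndS : ((PySem.Set.ofList (l ++ [a])).erase a).Nodup :=
    (PySem.Set.nodup_ofList (l ++ [a])).erase a
  have hmemS : ∀ p : Int × Int, p ∈ (PySem.Set.ofList (l ++ [a])).erase a ↔ p ∈ l := by
    intro p
    rw [List.Nodup.mem_erase_iff (PySem.Set.nodup_ofList _)]
    rw [PySem.Set.mem_ofList]
    simp only [List.mem_append, List.mem_singleton]
    constructor
    · rintro ⟨hpa, hp | rfl⟩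
      · exact hp
      · exact absurd rfl hpa
    · intro hp
      exact ⟨fun hh => hal (hh ▸ hp), Or.inl hp⟩
  have hB : bfs_alt (l ++ [a]) = true ↔ ∀ p ∈ l, pvRch l a p := by
    have hv : bfs_alt (l ++ [a]) =
        (pvVisit (pvNbrs a) ((PySem.Set.ofList (l ++ [a])).erase a)).val.isEmpty := by
      simp [bfs_alt, hget]
    obtain ⟨hmem, -⟩ := pvVisit_char (pvNbrs a) _ hndS
    rw [hv, List.isEmpty_iff, List.eq_nil_iff_forall_not_mem]
    constructor
    · intro hres p hp
      have := hres p
      rw [hmem p] at this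
      by_contra hnr
      apply this
      refine ⟨(hmemS p).2 hp, fun hrem => ?_⟩
      have : pvRch ((PySem.Set.ofList (l ++ [a])).erase a) a p := pvRch_first.mpr hrem
      exact hnr ((pvRch_congr hmemS a p).1 this)
    · intro hall p hp
      rw [hmem p] at hp
      obtain ⟨hpS, hnrem⟩ := hp
      apply hnrem
      apply pvRch_first.mp
      exact (pvRch_congr hmemS a p).2 (hall p ((hmemS p).1 hpS))
  rw [Bool.eq_iff_iff, hA, hB]
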